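-- pv_equiv track=rewrite | github.com/diothor/dcp-python | problems/problem_285.py | with_view
-- ===== SOURCE A (Python) =====
-- def with_view(buildings) -> int:
--     highest = 0
--     count = 0
--     for b in reversed(buildings):
--         if b > highest:
--             highest = b
--             count += 1
--     return count
-- ===== SOURCE B (Python) =====
-- def with_view(buildings) -> int:
--     n = len(buildings)
--     smax = [0] * n
--     running = 0
--     for i in range(n - 1, -1, -1):
--         smax[i] = running
--         if buildings[i] > running:
--             running = buildings[i]
--     return sum(1 for i in range(n) if buildings[i] > smax[i])
-- ===== Notes on version B (the rewrite author's own statement) =====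
-- stated objective: alternative
-- what changed: Replaces the fused right-to-left scan with two passes: build a 0-clamped suffix-maximum table, then count indices whose building exceeds its table entry.
import Mathlib
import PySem

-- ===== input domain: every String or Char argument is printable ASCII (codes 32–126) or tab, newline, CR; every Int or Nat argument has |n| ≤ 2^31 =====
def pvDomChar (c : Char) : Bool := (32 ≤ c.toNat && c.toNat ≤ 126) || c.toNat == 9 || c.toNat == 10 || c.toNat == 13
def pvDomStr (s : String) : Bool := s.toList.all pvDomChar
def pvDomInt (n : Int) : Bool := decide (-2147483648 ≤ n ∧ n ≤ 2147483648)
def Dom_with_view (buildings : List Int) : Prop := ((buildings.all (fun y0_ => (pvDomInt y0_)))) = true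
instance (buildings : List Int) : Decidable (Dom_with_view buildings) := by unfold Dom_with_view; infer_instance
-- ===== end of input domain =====

-- B builds a 0-clamped suffix-maximum table in one pass, then counts buildings exceeding their table entry (alternative decomposition, same cost).


-- ===== PORT A =====
-- literal port: fold over reversed list with state (highest, count)
def with_view (buildings : List Int) : Int :=
  (buildings.reverse.foldl
    (fun (st : Int × Int) b => if b > st.1 then (b, st.2 + 1) else st) (0, 0)).2

-- ===== PORT B =====
-- right-to-left pass producing (running max, suffix-max table)
def suffixMaxB (l : List Int) : Int × List Int :=
  l.foldr (fun b st => (if b > st.1 then b else st.1, st.1 :: st.2)) (0, [])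

def with_view_alt (buildings : List Int) : Int :=
  (((buildings.zip (suffixMaxB buildings).2).filter (fun p => p.1 > p.2)).length : Int)

-- ===== PRECONDITION & SPEC =====
def Spec_with_view (buildings : List Int) (out : Int) : Prop := out = with_view_alt buildings
instance (buildings : List Int) (out : Int) : Decidable (Spec_with_view buildings out) := by unfold Spec_with_view; infer_instance

-- ===== CLAIM (what is proved, stated in full; the proofs are below) =====
def Claim_equal_with_view : Prop := ∀ (buildings : List Int), Dom_with_view buildings → Spec_with_view buildings (with_view buildings)

-- ===== LEMMAS AND PROOFS =====
theorem with_view_fold_eq (l : List Int) :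
    l.foldr (fun b (st : Int × Int) => if b > st.1 then (b, st.2 + 1) else st) (0, 0)
      = ((suffixMaxB l).1,
         (((l.zip (suffixMaxB l).2).filter (fun p => p.1 > p.2)).length : Int)) := by
  induction l with
  | nil => simp [suffixMaxB]
  | cons b rest ih =>
    simp only [List.foldr_cons, ih, suffixMaxB, List.zip_cons_cons, List.filter_cons]
    by_cases h : b > (rest.foldr (fun b st => (if b > st.1 then b else st.1, st.1 :: st.2)) ((0 : Int), ([] : List Int))).1 <;>
      simp [h]

-- ===== VERDICT (by name: the statement is the Claim_ definition above) =====
theorem with_view_spec : Claim_equal_with_view := by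
  intro l _
  show _ = _
  rw [with_view, List.foldl_reverse]
  have := with_view_fold_eq l
  simp only [with_view_alt]
  rw [show (fun (b : Int) (st : Int × Int) => if st.1 < b then (b, st.2 + 1) else st)
        = (fun b (st : Int × Int) => if b > st.1 then (b, st.2 + 1) else st) from rfl]
  rw [this]
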